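-- pv_equiv track=rewrite | github.com/Xinyue158/cs526 | HW5/526HW5 Q2.py | count_vowel_combos
-- ===== SOURCE A (Python) =====
-- def count_vowel_combos(code_str):
--     n = len(code_str)
--     dp = [0] * (n + 1)
--     dp[0] = 1
--
--     for i in range(1, n + 1):
--
--
--         if code_str[i - 1:i] == ".":
--             dp[i] += dp[i - 1]
--
--         if i >= 2:
--             last2 = code_str[i - 2:i]
--             if last2 == ".-" or last2 == "..":
--                 dp[i] += dp[i - 2]
--
--         if i >= 3:
--             last3 = code_str[i - 3:i]
--             if last3 == "---" or last3 == "..-":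
--                 dp[i] += dp[i - 3]
--
--     return dp[n]
-- ===== SOURCE B (Python) =====
-- def count_vowel_combos(code_str):
--     # Count accepting paths in the token-trie automaton of {'.', '.-', '..', '---', '..-'}.
--     # State counts: root = parses with no pending token; d/dd/m/mm = parses with a
--     # pending partial token '.', '..', '-', '--' respectively.
--     root, d, dd, m, mm = 1, 0, 0, 0, 0
--     for c in code_str:
--         if c == '.':
--             root, d, dd, m, mm = root + d, root, d, 0, 0
--         elif c == '-':
--             root, d, dd, m, mm = d + dd + mm, 0, 0, root, m
--         else:
--             root, d, dd, m, mm = 0, 0, 0, 0, 0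
--     return root
-- ===== Notes on version B (the rewrite author's own statement) =====
-- stated objective: faster
-- what changed: B counts accepting paths in the token-trie automaton (five running counts of parses with each pending partial token, updated per character) instead of A's position-indexed DP table with length-1/2/3 window slices.
import Mathlib
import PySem

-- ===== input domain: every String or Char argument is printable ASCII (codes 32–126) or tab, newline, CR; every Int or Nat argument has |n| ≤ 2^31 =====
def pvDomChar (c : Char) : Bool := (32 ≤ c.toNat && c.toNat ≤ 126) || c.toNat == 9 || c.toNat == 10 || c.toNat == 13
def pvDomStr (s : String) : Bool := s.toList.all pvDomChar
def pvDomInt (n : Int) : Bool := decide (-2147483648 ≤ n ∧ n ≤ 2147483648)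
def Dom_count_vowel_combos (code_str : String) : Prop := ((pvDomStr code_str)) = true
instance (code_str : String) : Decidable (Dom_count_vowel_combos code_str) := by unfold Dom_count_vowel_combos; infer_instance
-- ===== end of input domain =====

-- B counts accepting paths in the token-trie automaton of {'.', '.-', '..', '---', '..-'}
-- (five running counts of parses with each pending partial token, updated once per
-- character, no slicing) instead of A's position-indexed DP table with window slices;
-- the return values are proved equal on every input.

-- ===== PORT A =====
-- the three conditional updates of A's loop body, in statement order
def updA1 (cs : List Char) (dp : List Int) (i : Int) : List Int :=
  if PySem.List.slice cs (some (i - 1)) (some i) = ['.'] then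
    PySem.List.pySetD dp i (PySem.List.pyGetD dp i 0 + PySem.List.pyGetD dp (i - 1) 0)
  else dp

def updA2 (cs : List Char) (dp : List Int) (i : Int) : List Int :=
  if 2 ≤ i then
    if PySem.List.slice cs (some (i - 2)) (some i) = ['.', '-'] ∨
       PySem.List.slice cs (some (i - 2)) (some i) = ['.', '.'] then
      PySem.List.pySetD dp i (PySem.List.pyGetD dp i 0 + PySem.List.pyGetD dp (i - 2) 0)
    else dp
  else dp

def updA3 (cs : List Char) (dp : List Int) (i : Int) : List Int :=
  if 3 ≤ i then
    if PySem.List.slice cs (some (i - 3)) (some i) = ['-', '-', '-'] ∨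
       PySem.List.slice cs (some (i - 3)) (some i) = ['.', '.', '-'] then
      PySem.List.pySetD dp i (PySem.List.pyGetD dp i 0 + PySem.List.pyGetD dp (i - 3) 0)
    else dp
  else dp

-- one iteration of A's `for i in range(1, n+1)` body
def stepA (cs : List Char) (dp : List Int) (i : Int) : List Int :=
  updA3 cs (updA2 cs (updA1 cs dp i) i) i

def count_vowel_combos (code_str : String) : Int :=
  let cs := code_str.toList
  let n : Int := cs.length
  let dp : List Int := List.replicate (n + 1).toNat 0
  let dp := PySem.List.pySetD dp 0 1
  let dp := (PySem.List.pyRange 1 (n + 1) 1).foldl (stepA cs) dp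
  PySem.List.pyGetD dp n 0

-- ===== PORT B =====
-- one iteration of B's `for c in code_str` body: state = (root, d, dd, m, mm)
def stepB (s : Int × Int × Int × Int × Int) (c : Char) : Int × Int × Int × Int × Int :=
  if c = '.' then (s.1 + s.2.1, s.1, s.2.1, 0, 0)
  else if c = '-' then (s.2.1 + s.2.2.1 + s.2.2.2.2, 0, 0, s.1, s.2.2.2.1)
  else (0, 0, 0, 0, 0)

def count_vowel_combos_alt (code_str : String) : Int :=
  (code_str.toList.foldl stepB (1, 0, 0, 0, 0)).1

-- ===== PRECONDITION & SPEC =====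
def Spec_count_vowel_combos (code_str : String) (out : Int) : Prop := out = count_vowel_combos_alt code_str
instance (code_str : String) (out : Int) : Decidable (Spec_count_vowel_combos code_str out) := by unfold Spec_count_vowel_combos; infer_instance

-- ===== CLAIM (what is proved, stated in full; the proofs are below) =====
def Claim_equal_count_vowel_combos : Prop := ∀ (code_str : String), Dom_count_vowel_combos code_str → Spec_count_vowel_combos code_str (count_vowel_combos code_str)

-- ===== LEMMAS AND PROOFS =====
def pvI (p : Prop) [Decidable p] : Int := if p then 1 else 0

lemma pvI_congr {p q : Prop} [Decidable p] [Decidable q] (h : p ↔ q) : pvI p = pvI q := by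
  simp [pvI, h]

lemma pvI_true {p : Prop} [Decidable p] (h : p) : pvI p = 1 := by simp [pvI, h]
lemma pvI_false {p : Prop} [Decidable p] (h : ¬ p) : pvI p = 0 := by simp [pvI, h]

def scnt : List Char → Int
  | [] => 1
  | [a] => pvI (a = '.')
  | [a, b] => pvI (a = '.') * scnt [b] + pvI (a = '.' ∧ (b = '-' ∨ b = '.'))
  | a :: b :: c :: r =>
      pvI (a = '.') * scnt (b :: c :: r)
      + pvI (a = '.' ∧ (b = '-' ∨ b = '.')) * scnt (c :: r)
      + pvI ((a = '-' ∧ b = '-' ∧ c = '-') ∨ (a = '.' ∧ b = '.' ∧ c = '-')) * scnt r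

def rcnt : List Char → Int
  | [] => 1
  | [a] => pvI (a = '.')
  | [a, b] => pvI (a = '.') * rcnt [b] + pvI (b = '.' ∧ (a = '-' ∨ a = '.'))
  | a :: b :: c :: r =>
      pvI (a = '.') * rcnt (b :: c :: r)
      + pvI (b = '.' ∧ (a = '-' ∨ a = '.')) * rcnt (c :: r)
      + pvI ((c = '-' ∧ b = '-' ∧ a = '-') ∨ (c = '.' ∧ b = '.' ∧ a = '-')) * rcnt r

theorem scnt_append3 : ∀ (u : List Char) (c b a : Char),
    scnt (u ++ [c, b, a]) =
      pvI (a = '.') * scnt (u ++ [c, b])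
      + pvI (b = '.' ∧ (a = '-' ∨ a = '.')) * scnt (u ++ [c])
      + pvI ((c = '-' ∧ b = '-' ∧ a = '-') ∨ (c = '.' ∧ b = '.' ∧ a = '-')) * scnt u := by
  intro u
  induction u using scnt.induct with
  | case1 => intro c b a; simp only [List.nil_append, scnt]; ring
  | case2 x => intro c b a; simp only [List.cons_append, List.nil_append, scnt]; ring
  | case3 x y => intro c b a; simp only [List.cons_append, List.nil_append, scnt]; ring
  | case4 x y z v ih1 ih2 ih3 =>
      intro c b a
      simp only [List.cons_append] at ih1 ih2 ih3 ⊢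
      rw [scnt, scnt, scnt, scnt]
      rw [ih1, ih2, ih3]
      ring

theorem rcnt_eq_scnt_reverse : ∀ (r : List Char), rcnt r = scnt r.reverse := by
  intro r
  induction r using rcnt.induct with
  | case1 => rfl
  | case2 a => rfl
  | case3 a b => simp only [rcnt, scnt, List.reverse_cons, List.reverse_nil, List.nil_append,
      List.cons_append]; ring
  | case4 a b c r ih1 ih2 ih3 =>
      rw [rcnt]
      have hrev : (a :: b :: c :: r).reverse = r.reverse ++ [c, b, a] := by
        simp
      rw [hrev, scnt_append3]
      rw [ih1, ih2, ih3]
      have h1 : (b :: c :: r).reverse = r.reverse ++ [c, b] := by simp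
      have h2 : (c :: r).reverse = r.reverse ++ [c] := by simp
      rw [h1, h2]

def pfx (cs : List Char) (j : Nat) : Int := rcnt ((cs.take j).reverse)

lemma take_succ_rev (cs : List Char) (k : Nat) (hk : k < cs.length) :
    (cs.take (k+1)).reverse = cs[k] :: (cs.take k).reverse := by
  rw [List.take_add_one, List.getElem?_eq_getElem hk]
  simp

lemma slice_eq_take_drop (cs : List Char) (a b : Int) (j d : Nat) (h0 : 0 ≤ a) (h1 : 0 ≤ b)
    (ha : a = (j:Int)) (hd : b = ((j+d:Nat):Int)) :
    PySem.List.slice cs (some a) (some b) = (cs.drop j).take d := by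
  subst ha; subst hd
  rw [PySem.List.slice_natCast]
  congr 1
  omega

lemma pfx_eq (cs : List Char) (k : Nat) (hk : k < cs.length) :
    pfx cs (k+1) =
      pvI (PySem.List.slice cs (some (k:Int)) (some ((k:Int)+1)) = ['.']) * pfx cs k
    + pvI (1 ≤ k ∧ (PySem.List.slice cs (some ((k:Int)-1)) (some ((k:Int)+1)) = ['.', '-'] ∨
           PySem.List.slice cs (some ((k:Int)-1)) (some ((k:Int)+1)) = ['.', '.'])) * pfx cs (k-1)
    + pvI (2 ≤ k ∧ (PySem.List.slice cs (some ((k:Int)-2)) (some ((k:Int)+1)) = ['-', '-', '-'] ∨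
           PySem.List.slice cs (some ((k:Int)-2)) (some ((k:Int)+1)) = ['.', '.', '-'])) * pfx cs (k-2) := by
  match k, hk with
  | 0, hk =>
      have s1 : PySem.List.slice cs (some ((0:Nat):Int)) (some (((0:Nat):Int)+1)) = (cs.drop 0).take 1 :=
        slice_eq_take_drop cs _ _ 0 1 (by omega) (by omega) (by omega) (by omega)
      rw [show pvI (1 ≤ 0 ∧ (PySem.List.slice cs (some ((((0:Nat):Int))-1)) (some (((0:Nat):Int)+1)) = ['.', '-'] ∨
            PySem.List.slice cs (some ((((0:Nat):Int))-1)) (some (((0:Nat):Int)+1)) = ['.', '.'])) = 0 by simp [pvI],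
          show pvI (2 ≤ 0 ∧ (PySem.List.slice cs (some ((((0:Nat):Int))-2)) (some (((0:Nat):Int)+1)) = ['-', '-', '-'] ∨
            PySem.List.slice cs (some ((((0:Nat):Int))-2)) (some (((0:Nat):Int)+1)) = ['.', '.', '-'])) = 0 by simp [pvI],
          s1]
      have e0 : cs.drop 0 = cs[0] :: cs.drop 1 := List.drop_eq_getElem_cons hk
      rw [e0, show List.take 1 (cs[0] :: cs.drop 1) = [cs[0]] from rfl]
      unfold pfx
      rw [take_succ_rev cs 0 hk]
      rw [show (cs.take 0).reverse = ([] : List Char) from rfl,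
          show rcnt [cs[0]] = pvI (cs[0] = '.') from rfl,
          show rcnt [] = 1 from rfl]
      rw [pvI_congr (p := ([cs[0]] : List Char) = ['.']) (q := cs[0] = '.') (by simp)]
      ring
  | 1, hk =>
      have h0 : 0 < cs.length := by omega
      have e0 : cs.drop 0 = cs[0] :: cs.drop 1 := List.drop_eq_getElem_cons h0
      have e1 : cs.drop 1 = cs[1] :: cs.drop 2 := List.drop_eq_getElem_cons hk
      have s1 : PySem.List.slice cs (some ((1:Nat):Int)) (some (((1:Nat):Int)+1)) = (cs.drop 1).take 1 :=
        slice_eq_take_drop cs _ _ 1 1 (by omega) (by omega) (by omega) (by omega)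
      have s2 : PySem.List.slice cs (some (((1:Nat):Int)-1)) (some (((1:Nat):Int)+1)) = (cs.drop 0).take 2 :=
        slice_eq_take_drop cs _ _ 0 2 (by omega) (by omega) (by omega) (by omega)
      rw [show pvI (2 ≤ 1 ∧ (PySem.List.slice cs (some ((((1:Nat):Int))-2)) (some (((1:Nat):Int)+1)) = ['-', '-', '-'] ∨
            PySem.List.slice cs (some ((((1:Nat):Int))-2)) (some (((1:Nat):Int)+1)) = ['.', '.', '-'])) = 0 by simp [pvI],
          s1, s2, e0, e1,
          show List.take 1 (cs[1] :: cs.drop 2) = [cs[1]] from rfl,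
          show List.take 2 (cs[0] :: cs[1] :: cs.drop 2) = [cs[0], cs[1]] from rfl]
      unfold pfx
      rw [take_succ_rev cs 1 hk, take_succ_rev cs 0 h0]
      rw [show (cs.take 0).reverse = ([] : List Char) from rfl,
          show rcnt [cs[1], cs[0]] = pvI (cs[1] = '.') * rcnt [cs[0]] + pvI (cs[0] = '.' ∧ (cs[1] = '-' ∨ cs[1] = '.')) from rfl,
          show rcnt [cs[0]] = pvI (cs[0] = '.') from rfl, show rcnt [] = 1 from rfl]
      rw [pvI_congr (p := ([cs[1]] : List Char) = ['.']) (q := cs[1] = '.') (by simp),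
          pvI_congr (p := 1 ≤ 1 ∧ (([cs[0], cs[1]] : List Char) = ['.', '-'] ∨ ([cs[0], cs[1]] : List Char) = ['.', '.']))
            (q := cs[0] = '.' ∧ (cs[1] = '-' ∨ cs[1] = '.')) (by simp; try tauto)]
      ring
  | (m+2), hk =>
      have h1 : m + 1 < cs.length := by omega
      have h0 : m < cs.length := by omega
      have e0 : cs.drop m = cs[m] :: cs.drop (m+1) := List.drop_eq_getElem_cons h0
      have e1 : cs.drop (m+1) = cs[m+1] :: cs.drop (m+2) := List.drop_eq_getElem_cons h1
      have e2 : cs.drop (m+2) = cs[m+2] :: cs.drop (m+3) := List.drop_eq_getElem_cons hk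
      have s1 : PySem.List.slice cs (some ((m+2:Nat):Int)) (some (((m+2:Nat):Int)+1)) = (cs.drop (m+2)).take 1 :=
        slice_eq_take_drop cs _ _ (m+2) 1 (by omega) (by omega) (by omega) (by omega)
      have s2 : PySem.List.slice cs (some (((m+2:Nat):Int)-1)) (some (((m+2:Nat):Int)+1)) = (cs.drop (m+1)).take 2 :=
        slice_eq_take_drop cs _ _ (m+1) 2 (by omega) (by omega) (by omega) (by omega)
      have s3 : PySem.List.slice cs (some (((m+2:Nat):Int)-2)) (some (((m+2:Nat):Int)+1)) = (cs.drop m).take 3 :=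
        slice_eq_take_drop cs _ _ m 3 (by omega) (by omega) (by omega) (by omega)
      rw [e2] at e1
      rw [e1] at e0
      rw [s1, s2, s3, e2, e1, e0,
          show List.take 1 (cs[m+2] :: cs.drop (m+3)) = [cs[m+2]] from rfl,
          show List.take 2 (cs[m+1] :: cs[m+2] :: cs.drop (m+3)) = [cs[m+1], cs[m+2]] from rfl,
          show List.take 3 (cs[m] :: cs[m+1] :: cs[m+2] :: cs.drop (m+3)) = [cs[m], cs[m+1], cs[m+2]] from rfl]
      rw [show (m+2) - 1 = m + 1 from rfl, show (m+2) - 2 = m from rfl]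
      unfold pfx
      rw [take_succ_rev cs (m+2) hk, take_succ_rev cs (m+1) h1, take_succ_rev cs m h0]
      rw [show rcnt (cs[m+2] :: cs[m+1] :: cs[m] :: (cs.take m).reverse) =
            pvI (cs[m+2] = '.') * rcnt (cs[m+1] :: cs[m] :: (cs.take m).reverse)
            + pvI (cs[m+1] = '.' ∧ (cs[m+2] = '-' ∨ cs[m+2] = '.')) * rcnt (cs[m] :: (cs.take m).reverse)
            + pvI ((cs[m] = '-' ∧ cs[m+1] = '-' ∧ cs[m+2] = '-') ∨ (cs[m] = '.' ∧ cs[m+1] = '.' ∧ cs[m+2] = '-')) * rcnt ((cs.take m).reverse) from rfl]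
      rw [pvI_congr (p := ([cs[m+2]] : List Char) = ['.']) (q := cs[m+2] = '.') (by simp),
          pvI_congr (p := 1 ≤ m+2 ∧ (([cs[m+1], cs[m+2]] : List Char) = ['.', '-'] ∨ ([cs[m+1], cs[m+2]] : List Char) = ['.', '.']))
            (q := cs[m+1] = '.' ∧ (cs[m+2] = '-' ∨ cs[m+2] = '.')) (by rw [and_iff_right (by omega)]; simp; try tauto),
          pvI_congr (p := 2 ≤ m+2 ∧ (([cs[m], cs[m+1], cs[m+2]] : List Char) = ['-', '-', '-'] ∨ ([cs[m], cs[m+1], cs[m+2]] : List Char) = ['.', '.', '-']))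
            (q := (cs[m] = '-' ∧ cs[m+1] = '-' ∧ cs[m+2] = '-') ∨ (cs[m] = '.' ∧ cs[m+1] = '.' ∧ cs[m+2] = '-')) (by rw [and_iff_right (by omega)]; simp; try tauto)]
      try ring

def dpA (cs : List Char) (k : Nat) : List Int :=
  (List.range (cs.length + 1)).map (fun j => if j ≤ k then pfx cs j else 0)

lemma length_dpA (cs : List Char) (k : Nat) : (dpA cs k).length = cs.length + 1 := by
  simp [dpA]

lemma getD_dpA (cs : List Char) (k m : Nat) (hm : m < cs.length + 1) :
    (dpA cs k).getD m 0 = if m ≤ k then pfx cs m else 0 := by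
  rw [List.getD_eq_getElem?_getD]
  simp [dpA, hm]

lemma set_getD_self (l : List Int) (n : Nat) (hn : n < l.length) : l.set n (l.getD n 0) = l := by
  apply List.ext_getElem (by simp)
  intro i h1 h2
  simp only [List.getElem_set]
  split_ifs with h
  · subst h; exact (List.getD_eq_getElem l 0 hn).symm ▸ rfl
  · rfl

lemma if_guard {α : Type} (p q : Prop) [Decidable p] [Decidable q] (x y : α) :
    (if p then (if q then x else y) else y) = if p ∧ q then x else y := by
  split_ifs <;> tauto

lemma cond_update (dp : List Int) (n : Nat) (c : Prop) [Decidable c] (w : Int)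
    (h1 : n < dp.length) :
    (if c then PySem.List.pySetD dp ((n:Int)) (PySem.List.pyGetD dp ((n:Int)) 0 + w) else dp)
      = PySem.List.pySetD dp ((n:Int)) (PySem.List.pyGetD dp ((n:Int)) 0 + pvI c * w) := by
  unfold pvI
  split_ifs with h
  · rw [one_mul]
  · rw [mul_comm, mul_zero, add_zero, PySem.List.pySetD_natCast, PySem.List.pyGetD_natCast,
        set_getD_self _ _ h1]

lemma setD_setD (dp : List Int) (n : Nat) (a b : Int) :
    PySem.List.pySetD (PySem.List.pySetD dp ((n:Int)) a) ((n:Int)) b = PySem.List.pySetD dp ((n:Int)) b := by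
  simp [PySem.List.pySetD_natCast, List.set_set]

lemma pvI_mul_congr {p : Prop} [Decidable p] {x y : Int} (h : p → x = y) :
    pvI p * x = pvI p * y := by
  unfold pvI; split_ifs with hp
  · rw [h hp]
  · ring

lemma pyGetD_pySetD_self (dp : List Int) (n : Nat) (v : Int) (h : n < dp.length) :
    PySem.List.pyGetD (PySem.List.pySetD dp ((n:Int)) v) ((n:Int)) 0 = v := by
  have := PySem.List.pyGetD_pySetD_natCast dp n n v 0 h
  simpa using this

lemma set_dpA (cs : List Char) (k : Nat) (v : Int) (hv : v = pfx cs (k+1)) :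
    (dpA cs k).set (k+1) v = dpA cs (k+1) := by
  subst hv
  apply List.ext_getElem (by simp [dpA])
  intro i h1 h2
  simp only [dpA, List.getElem_set, List.getElem_map, List.getElem_range]
  split_ifs <;> first | rfl | omega | simp_all

lemma stepA_eq (cs : List Char) (k : Nat) (hk : k < cs.length) :
    updA3 cs (updA2 cs (updA1 cs (dpA cs k) (((k+1:Nat)):Int)) (((k+1:Nat)):Int)) (((k+1:Nat)):Int)
      = dpA cs (k+1) := by
  have hlen : k + 1 < (dpA cs k).length := by rw [length_dpA]; omega
  have g0 : PySem.List.pyGetD (dpA cs k) (((k+1:Nat)):Int) 0 = 0 := by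
    rw [PySem.List.pyGetD_natCast, getD_dpA cs k (k+1) (by omega), if_neg (by omega)]
  have u1 : updA1 cs (dpA cs k) (((k+1:Nat)):Int)
      = PySem.List.pySetD (dpA cs k) (((k+1:Nat)):Int)
          (0 + pvI (PySem.List.slice cs (some ((((k+1:Nat)):Int) - 1)) (some (((k+1:Nat)):Int)) = ['.'])
            * pfx cs k) := by
    unfold updA1
    rw [cond_update _ (k+1) _ _ hlen, g0]
    congr 2
    exact pvI_mul_congr (by
      intro _
      rw [show (((k+1:Nat)):Int) - 1 = ((k:Nat):Int) by push_cast; ring,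
          PySem.List.pyGetD_natCast, getD_dpA cs k k (by omega), if_pos (by omega)])
  have u2 : ∀ v : Int, updA2 cs (PySem.List.pySetD (dpA cs k) (((k+1:Nat)):Int) v) (((k+1:Nat)):Int)
      = PySem.List.pySetD (dpA cs k) (((k+1:Nat)):Int)
          (v + pvI (2 ≤ (((k+1:Nat)):Int) ∧
                (PySem.List.slice cs (some ((((k+1:Nat)):Int) - 2)) (some (((k+1:Nat)):Int)) = ['.', '-'] ∨
                 PySem.List.slice cs (some ((((k+1:Nat)):Int) - 2)) (some (((k+1:Nat)):Int)) = ['.', '.']))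
            * pfx cs (k-1)) := by
    intro v
    unfold updA2
    rw [if_guard]
    rw [cond_update _ (k+1) _ _ (by rw [PySem.List.length_pySetD]; exact hlen)]
    rw [setD_setD, pyGetD_pySetD_self _ _ _ hlen]
    congr 2
    exact pvI_mul_congr (by
      intro hp
      have hk1 : 1 ≤ k := by omega
      rw [show (((k+1:Nat)):Int) - 2 = (((k-1:Nat)):Int) by omega,
          PySem.List.pyGetD_pySetD_natCast _ (k+1) (k-1) _ 0 hlen, if_neg (by omega),
          PySem.List.pyGetD_natCast, getD_dpA cs k (k-1) (by omega), if_pos (by omega)])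
  have u3 : ∀ v : Int, updA3 cs (PySem.List.pySetD (dpA cs k) (((k+1:Nat)):Int) v) (((k+1:Nat)):Int)
      = PySem.List.pySetD (dpA cs k) (((k+1:Nat)):Int)
          (v + pvI (3 ≤ (((k+1:Nat)):Int) ∧
                (PySem.List.slice cs (some ((((k+1:Nat)):Int) - 3)) (some (((k+1:Nat)):Int)) = ['-', '-', '-'] ∨
                 PySem.List.slice cs (some ((((k+1:Nat)):Int) - 3)) (some (((k+1:Nat)):Int)) = ['.', '.', '-']))
            * pfx cs (k-2)) := by
    intro v
    unfold updA3
    rw [if_guard]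
    rw [cond_update _ (k+1) _ _ (by rw [PySem.List.length_pySetD]; exact hlen)]
    rw [setD_setD, pyGetD_pySetD_self _ _ _ hlen]
    congr 2
    exact pvI_mul_congr (by
      intro hp
      have hk2 : 2 ≤ k := by omega
      rw [show (((k+1:Nat)):Int) - 3 = (((k-2:Nat)):Int) by omega,
          PySem.List.pyGetD_pySetD_natCast _ (k+1) (k-2) _ 0 hlen, if_neg (by omega),
          PySem.List.pyGetD_natCast, getD_dpA cs k (k-2) (by omega), if_pos (by omega)])
  rw [u1, u2, u3, PySem.List.pySetD_natCast]
  refine set_dpA cs k _ ?_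
  rw [pfx_eq cs k hk]
  rw [show (((k+1:Nat)):Int) - 1 = ((k:Nat):Int) by push_cast; ring,
      show (((k+1:Nat)):Int) - 2 = ((k:Nat):Int) - 1 by push_cast; ring,
      show (((k+1:Nat)):Int) - 3 = ((k:Nat):Int) - 2 by push_cast; ring,
      show (((k+1:Nat)):Int) = ((k:Nat):Int) + 1 by push_cast; ring]
  rw [pvI_congr (p := 2 ≤ ((k:Nat):Int) + 1 ∧
        (PySem.List.slice cs (some (((k:Nat):Int) - 1)) (some (((k:Nat):Int) + 1)) = ['.', '-'] ∨
         PySem.List.slice cs (some (((k:Nat):Int) - 1)) (some (((k:Nat):Int) + 1)) = ['.', '.']))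
        (q := 1 ≤ k ∧
        (PySem.List.slice cs (some (((k:Nat):Int) - 1)) (some (((k:Nat):Int) + 1)) = ['.', '-'] ∨
         PySem.List.slice cs (some (((k:Nat):Int) - 1)) (some (((k:Nat):Int) + 1)) = ['.', '.']))
        (and_congr_left' (by constructor <;> intro <;> omega)),
      pvI_congr (p := 3 ≤ ((k:Nat):Int) + 1 ∧
        (PySem.List.slice cs (some (((k:Nat):Int) - 2)) (some (((k:Nat):Int) + 1)) = ['-', '-', '-'] ∨
         PySem.List.slice cs (some (((k:Nat):Int) - 2)) (some (((k:Nat):Int) + 1)) = ['.', '.', '-']))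
        (q := 2 ≤ k ∧
        (PySem.List.slice cs (some (((k:Nat):Int) - 2)) (some (((k:Nat):Int) + 1)) = ['-', '-', '-'] ∨
         PySem.List.slice cs (some (((k:Nat):Int) - 2)) (some (((k:Nat):Int) + 1)) = ['.', '.', '-']))
        (and_congr_left' (by constructor <;> intro <;> omega))]
  ring

lemma A_inv (cs : List Char) : ∀ k : Nat, k ≤ cs.length →
    (PySem.List.pyRange 1 ((k:Int) + 1) 1).foldl (stepA cs) (dpA cs 0) = dpA cs k := by
  intro k
  induction k with
  | zero =>
      intro _
      rw [show ((0:Nat):Int) + 1 = 1 by norm_num, PySem.List.pyRange_one_eq_nil (by norm_num),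
          List.foldl_nil]
  | succ k ih =>
      intro hk
      rw [show (((k+1:Nat)):Int) + 1 = ((k:Int) + 1) + 1 by push_cast; ring,
          PySem.List.pyRange_one_succ_right (by omega),
          List.foldl_append, List.foldl_cons, List.foldl_nil, ih (by omega)]
      rw [show ((k:Int) + 1) = (((k+1:Nat)):Int) by push_cast; ring]
      exact stepA_eq cs k (by omega)

lemma dpA_zero (cs : List Char) :
    PySem.List.pySetD (List.replicate (((cs.length:Int) + 1)).toNat 0) 0 1 = dpA cs 0 := by
  rw [show (((cs.length:Int)) + 1).toNat = cs.length + 1 by omega,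
      show (0:Int) = ((0:Nat):Int) by norm_num, PySem.List.pySetD_natCast]
  apply List.ext_getElem (by simp [dpA])
  intro i h1 h2
  simp only [dpA, List.getElem_set, List.getElem_map, List.getElem_range, List.getElem_replicate]
  split_ifs <;> first | rfl | omega | (subst_vars; rfl)

lemma a_eq (s : String) : count_vowel_combos s = scnt s.toList := by
  unfold count_vowel_combos
  dsimp only
  rw [dpA_zero, A_inv s.toList s.toList.length (le_refl _)]
  rw [PySem.List.pyGetD_natCast, getD_dpA s.toList s.toList.length s.toList.length (by omega),
      if_pos (le_refl _)]
  unfold pfx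
  rw [List.take_length, rcnt_eq_scnt_reverse, List.reverse_reverse]

-- B-side: the "finisher" counts of the pending partial tokens '.', '..', '-', '--'
def gDD : List Char → Int
  | '-' :: t => scnt t
  | _ => 0

def gD : List Char → Int
  | '-' :: t => scnt t
  | '.' :: t => scnt t + gDD t
  | _ => 0

def hMM : List Char → Int
  | '-' :: t => scnt t
  | _ => 0

def hM : List Char → Int
  | '-' :: t => hMM t
  | _ => 0

lemma gD_dash (l : List Char) : gD ('-' :: l) = scnt l := rfl
lemma gDD_dash (l : List Char) : gDD ('-' :: l) = scnt l := rfl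
lemma hMM_dash (l : List Char) : hMM ('-' :: l) = scnt l := rfl
lemma hM_dash (l : List Char) : hM ('-' :: l) = hMM l := rfl

lemma gD_dot (l : List Char) : gD ('.' :: l) = scnt l + gDD l := rfl

lemma gD_other (c : Char) (l : List Char) (h1 : c ≠ '.') (h2 : c ≠ '-') : gD (c :: l) = 0 := by
  simp only [gD]; split <;> simp_all
lemma gDD_other (c : Char) (l : List Char) (h : c ≠ '-') : gDD (c :: l) = 0 := by
  simp only [gDD]; split <;> simp_all
lemma hMM_other (c : Char) (l : List Char) (h : c ≠ '-') : hMM (c :: l) = 0 := by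
  simp only [hMM]; split <;> simp_all
lemma hM_other (c : Char) (l : List Char) (h : c ≠ '-') : hM (c :: l) = 0 := by
  simp only [hM]; split <;> simp_all

lemma scnt_cons_dot (l : List Char) : scnt ('.' :: l) = scnt l + gD l := by
  rcases l with _ | ⟨b, (_ | ⟨e, r⟩)⟩
  · simp [scnt, gD, pvI]
  · by_cases hb1 : b = '-'
    · subst hb1; simp [scnt, gD, pvI]
    · by_cases hb2 : b = '.'
      · subst hb2; simp [scnt, gD, gDD, pvI]
      · rw [gD_other b [] hb2 hb1, scnt, scnt, scnt,
            pvI_true (show ('.':Char) = '.' from rfl),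
            pvI_false (show ¬ (('.':Char) = '.' ∧ (b = '-' ∨ b = '.')) by tauto),
            pvI_false hb2]
        ring
  · rw [scnt, pvI_true (show ('.':Char) = '.' from rfl)]
    by_cases hb1 : b = '-'
    · subst hb1
      rw [gD_dash,
          pvI_true (show ('.':Char) = '.' ∧ (('-':Char) = '-' ∨ ('-':Char) = '.') by exact ⟨rfl, Or.inl rfl⟩),
          pvI_false (show ¬ ((('.':Char) = '-' ∧ ('-':Char) = '-' ∧ e = '-') ∨ (('.':Char) = '.' ∧ ('-':Char) = '.' ∧ e = '-')) by
            rintro (⟨h, _⟩ | ⟨_, h, _⟩) <;> exact absurd h (by decide))]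
      ring
    · by_cases hb2 : b = '.'
      · subst hb2
        rw [gD_dot]
        rw [pvI_true (show ('.':Char) = '.' ∧ (('.':Char) = '-' ∨ ('.':Char) = '.') from ⟨rfl, Or.inr rfl⟩)]
        by_cases he : e = '-'
        · subst he
          rw [pvI_true (show (('.':Char) = '-' ∧ ('.':Char) = '-' ∧ ('-':Char) = '-') ∨ (('.':Char) = '.' ∧ ('.':Char) = '.' ∧ ('-':Char) = '-') from Or.inr ⟨rfl, rfl, rfl⟩),
              gDD_dash]
          ring
        · rw [pvI_false (show ¬ ((('.':Char) = '-' ∧ ('.':Char) = '-' ∧ e = '-') ∨ (('.':Char) = '.' ∧ ('.':Char) = '.' ∧ e = '-')) by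
              rintro (⟨h, _⟩ | ⟨_, _, h⟩); exact absurd h (by decide); exact absurd h he),
              gDD_other e r he]
          ring
      · rw [gD_other b (e::r) hb2 hb1,
            pvI_false (show ¬ (('.':Char) = '.' ∧ (b = '-' ∨ b = '.')) by tauto),
            pvI_false (show ¬ ((('.':Char) = '-' ∧ b = '-' ∧ e = '-') ∨ (('.':Char) = '.' ∧ b = '.' ∧ e = '-')) by
              rintro (⟨h, _⟩ | ⟨_, h, _⟩); exact absurd h (by decide); exact absurd h hb2)]
        ring

lemma scnt_cons_dash (l : List Char) : scnt ('-' :: l) = hM l := by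
  rcases l with _ | ⟨b, (_ | ⟨e, r⟩)⟩
  · simp [scnt, hM, pvI]
  · by_cases hb : b = '-'
    · subst hb; simp [scnt, hM, hMM, pvI]
    · rw [hM_other b [] hb, scnt,
          pvI_false (show ¬ (('-':Char) = '.') by decide),
          pvI_false (show ¬ (('-':Char) = '.' ∧ (b = '-' ∨ b = '.')) by rintro ⟨h, _⟩; exact absurd h (by decide))]
      ring
  · rw [scnt, pvI_false (show ¬ (('-':Char) = '.') by decide),
        pvI_false (show ¬ (('-':Char) = '.' ∧ (b = '-' ∨ b = '.')) by rintro ⟨h, _⟩; exact absurd h (by decide))]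
    by_cases hb : b = '-'
    · subst hb
      rw [hM_dash]
      by_cases he : e = '-'
      · subst he
        rw [pvI_true (show (('-':Char) = '-' ∧ ('-':Char) = '-' ∧ ('-':Char) = '-') ∨ (('-':Char) = '.' ∧ ('-':Char) = '.' ∧ ('-':Char) = '-') from Or.inl ⟨rfl, rfl, rfl⟩),
            hMM_dash]
        ring
      · rw [pvI_false (show ¬ ((('-':Char) = '-' ∧ ('-':Char) = '-' ∧ e = '-') ∨ (('-':Char) = '.' ∧ ('-':Char) = '.' ∧ e = '-')) by
            rintro (⟨_, _, h⟩ | ⟨h, _⟩); exact absurd h he; exact absurd h (by decide)),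
            hMM_other e r he]
        ring
    · rw [hM_other b (e::r) hb,
          pvI_false (show ¬ ((('-':Char) = '-' ∧ b = '-' ∧ e = '-') ∨ (('-':Char) = '.' ∧ b = '.' ∧ e = '-')) by
            rintro (⟨_, h, _⟩ | ⟨h, _⟩); exact absurd h hb; exact absurd h (by decide))]
      ring

lemma scnt_cons_other (c : Char) (l : List Char) (h1 : c ≠ '.') (h2 : c ≠ '-') :
    scnt (c :: l) = 0 := by
  rcases l with _ | ⟨b, (_ | ⟨e, r⟩)⟩
  · rw [scnt, pvI_false h1]
  · rw [scnt, pvI_false h1, pvI_false (show ¬ (c = '.' ∧ (b = '-' ∨ b = '.')) by tauto)]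
    ring
  · rw [scnt, pvI_false h1, pvI_false (show ¬ (c = '.' ∧ (b = '-' ∨ b = '.')) by tauto),
        pvI_false (show ¬ ((c = '-' ∧ b = '-' ∧ e = '-') ∨ (c = '.' ∧ b = '.' ∧ e = '-')) by tauto)]
    ring

lemma B_inv : ∀ (l : List Char) (r d dd m mm : Int),
    (l.foldl stepB (r, d, dd, m, mm)).1 =
      r * scnt l + d * gD l + dd * gDD l + m * hM l + mm * hMM l := by
  intro l
  induction l with
  | nil => intro r d dd m mm; simp [scnt, gD, gDD, hM, hMM]
  | cons c t ih =>
      intro r d dd m mm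
      rw [List.foldl_cons]
      by_cases h1 : c = '.'
      · subst h1
        rw [show stepB (r, d, dd, m, mm) '.' = (r + d, r, d, 0, 0) from rfl, ih,
            scnt_cons_dot, gD_dot, gDD_other '.' t (by decide), hM_other '.' t (by decide),
            hMM_other '.' t (by decide)]
        ring
      · by_cases h2 : c = '-'
        · subst h2
          rw [show stepB (r, d, dd, m, mm) '-' = (d + dd + mm, 0, 0, r, m) from rfl, ih,
              scnt_cons_dash, gD_dash, gDD_dash, hM_dash, hMM_dash]
          ring
        · rw [show stepB (r, d, dd, m, mm) c = (0, 0, 0, 0, 0) by simp [stepB, h1, h2], ih,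
              scnt_cons_other c t h1 h2, gD_other c t h1 h2, gDD_other c t h2,
              hM_other c t h2, hMM_other c t h2]
          ring

lemma alt_eq (s : String) : count_vowel_combos_alt s = scnt s.toList := by
  unfold count_vowel_combos_alt
  rw [B_inv]
  ring

-- ===== VERDICT (by name: the statement is the Claim_ definition above) =====
theorem count_vowel_combos_spec : Claim_equal_count_vowel_combos := by
  intro code_str _
  unfold Spec_count_vowel_combos
  rw [a_eq, alt_eq]
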